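-- pv_equiv track=rewrite | github.com/samar-12-23/DSA_Regain | Police_theives_problem.py | catchThieves
-- ===== SOURCE A (Python) =====
-- def catchThieves(arr, k):
--     #code here
--     police = []
--     thief = []
--
--     for i in range(len(arr)):
--         if arr[i] == 'P':
--             police.append(i)
--         else:
--             thief.append(i)
--
--     i = j = 0
--     caught = 0
--
--     while i < len(police) and j < len(thief):
--         if abs(police[i] - thief[j]) <= k:
--             caught += 1
--             i += 1
--             j += 1
--         elif police[i] < thief[j]:
--             i += 1
--         else:
--             j += 1
--
--     return caught
-- ===== SOURCE B (Python) =====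
-- def catchThieves(arr, k):
--     # single left-to-right pass matching each new element against a FIFO queue
--     # of unmatched opposites (lists with head pointers as queues)
--     pq, tq = [], []
--     ph = th = 0
--     caught = 0
--     for i, c in enumerate(arr):
--         if c == 'P':
--             while th < len(tq) and i - tq[th] > k:
--                 th += 1
--             if th < len(tq):
--                 th += 1
--                 caught += 1
--             else:
--                 pq.append(i)
--         else:
--             while ph < len(pq) and i - pq[ph] > k:
--                 ph += 1
--             if ph < len(pq):
--                 ph += 1
--                 caught += 1
--             else:
--                 tq.append(i)
--     return caught
-- ===== Notes on version B (the rewrite author's own statement) =====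
-- stated objective: alternative
-- what changed: Replaced A's two-phase build-index-lists-then-two-pointer-merge with a single left-to-right pass that matches each element immediately against a FIFO queue of unmatched opposite indices (dropping stale fronts).
import Mathlib
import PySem

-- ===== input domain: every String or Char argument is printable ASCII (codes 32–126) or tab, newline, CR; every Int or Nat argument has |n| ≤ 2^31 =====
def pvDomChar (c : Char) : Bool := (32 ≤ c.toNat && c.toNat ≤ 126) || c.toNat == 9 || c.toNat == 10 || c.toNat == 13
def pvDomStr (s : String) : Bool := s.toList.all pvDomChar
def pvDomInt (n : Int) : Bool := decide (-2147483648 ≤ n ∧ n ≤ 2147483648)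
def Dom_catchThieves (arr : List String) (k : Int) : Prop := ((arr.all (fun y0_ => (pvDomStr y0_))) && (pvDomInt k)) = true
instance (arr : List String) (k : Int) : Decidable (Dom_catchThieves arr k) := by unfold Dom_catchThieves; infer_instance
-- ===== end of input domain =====

-- B replaces A's build-two-index-lists-then-two-pointer-merge by a single left-to-right
-- pass matching each element against a FIFO queue of unmatched opposites (objective: alternative).


-- ===== PORT A =====
-- the first for-loop: split the indices into the police list and the thief list (in order)
def pvBuildPT : List String → Int → List Int × List Int
  | [], _ => ([], [])
  | s :: rest, i =>
    let (p, t) := pvBuildPT rest (i + 1)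
    if s = "P" then (i :: p, t) else (p, i :: t)

-- the while-loop: two pointers into police/thief, modelled by consuming the lists from the front
def pvTwoPtr (k : Int) : List Int → List Int → Int → Int
  | p :: ps, t :: ts, caught =>
    if |p - t| ≤ k then pvTwoPtr k ps ts (caught + 1)
    else if p < t then pvTwoPtr k ps (t :: ts) caught
    else pvTwoPtr k (p :: ps) ts caught
  | _, _, caught => caught
termination_by ps ts _ => ps.length + ts.length

def catchThieves (arr : List String) (k : Int) : Int :=
  let (police, thief) := pvBuildPT arr 0
  pvTwoPtr k police thief 0

-- ===== PORT B =====
-- the inner while-loop: advance the head pointer past queue entries farther than k from i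
def pvDropStale (i k : Int) : List Int → List Int
  | [] => []
  | t :: ts => if i - t > k then pvDropStale i k ts else t :: ts

-- the for-loop of B: one pass, two FIFO queues of unmatched indices (head = queue front)
def pvOnePass (k : Int) : List String → Int → List Int → List Int → Int → Int
  | [], _, _, _, caught => caught
  | s :: rest, i, pq, tq, caught =>
    if s = "P" then
      match pvDropStale i k tq with
      | _ :: tq' => pvOnePass k rest (i + 1) pq tq' (caught + 1)
      | [] => pvOnePass k rest (i + 1) (pq ++ [i]) [] caught
    else
      match pvDropStale i k pq with
      | _ :: pq' => pvOnePass k rest (i + 1) pq' tq (caught + 1)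
      | [] => pvOnePass k rest (i + 1) [] (tq ++ [i]) caught

def catchThieves_alt (arr : List String) (k : Int) : Int :=
  pvOnePass k arr 0 [] [] 0

-- ===== PRECONDITION & SPEC =====
def Spec_catchThieves (arr : List String) (k : Int) (out : Int) : Prop := out = catchThieves_alt arr k
instance (arr : List String) (k : Int) (out : Int) : Decidable (Spec_catchThieves arr k out) := by unfold Spec_catchThieves; infer_instance

-- ===== CLAIM (what is proved, stated in full; the proofs are below) =====
def Claim_equal_catchThieves : Prop := ∀ (arr : List String) (k : Int), Dom_catchThieves arr k → Spec_catchThieves arr k (catchThieves arr k)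

-- ===== LEMMAS AND PROOFS =====

-- members of pvDropStale's result are members of the input
theorem pvDropStale_subset (i k : Int) (l : List Int) (x : Int) (hx : x ∈ pvDropStale i k l) : x ∈ l := by
  induction l with
  | nil => simp [pvDropStale] at hx
  | cons t ts ih =>
    simp only [pvDropStale] at hx
    split at hx
    · exact List.mem_cons_of_mem _ (ih hx)
    · exact hx

-- dropping stale thief fronts is exactly what the two-pointer loop does when the police front is i
theorem pvTwoPtr_dropStale (k i : Int) (ps ts : List Int) (qt : List Int) (c : Int)
    (hlt : ∀ x ∈ qt, x < i) :
    pvTwoPtr k (i :: ps) (qt ++ ts) c = pvTwoPtr k (i :: ps) (pvDropStale i k qt ++ ts) c := by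
  induction qt with
  | nil => rfl
  | cons t qt' ih =>
    have ht : t < i := hlt t (List.mem_cons_self)
    by_cases hst : i - t > k
    · have habs : ¬ |i - t| ≤ k := by rw [abs_of_pos (by omega)]; omega
      rw [pvDropStale, if_pos hst]
      rw [List.cons_append, pvTwoPtr, if_neg habs, if_neg (by omega)]
      exact ih (fun x hx => hlt x (List.mem_cons_of_mem _ hx))
    · rw [pvDropStale, if_neg hst]

-- symmetric: dropping stale police fronts when the thief front is i
theorem pvTwoPtr_dropStaleP (k i : Int) (ps ts : List Int) (qp : List Int) (c : Int)
    (hlt : ∀ x ∈ qp, x < i) :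
    pvTwoPtr k (qp ++ ps) (i :: ts) c = pvTwoPtr k (pvDropStale i k qp ++ ps) (i :: ts) c := by
  induction qp with
  | nil => rfl
  | cons p qp' ih =>
    have hp : p < i := hlt p (List.mem_cons_self)
    by_cases hst : i - p > k
    · have habs : ¬ |p - i| ≤ k := by rw [abs_of_neg (by omega)]; omega
      rw [pvDropStale, if_pos hst]
      rw [List.cons_append, pvTwoPtr, if_neg habs, if_pos (by omega)]
      exact ih (fun x hx => hlt x (List.mem_cons_of_mem _ hx))
    · rw [pvDropStale, if_neg hst]

-- if one of the two lists is empty, the two-pointer loop returns the accumulator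
theorem pvTwoPtr_empty (k : Int) (ps ts : List Int) (c : Int) (h : ps = [] ∨ ts = []) :
    pvTwoPtr k ps ts c = c := by
  rcases h with h | h
  · subst h; cases ts <;> simp [pvTwoPtr]
  · subst h; cases ps <;> simp [pvTwoPtr]

-- the front element kept by pvDropStale is within distance k of i
theorem pvDropStale_front (i k : Int) (l : List Int) (t : Int) (tq : List Int)
    (h : pvDropStale i k l = t :: tq) : i - t ≤ k := by
  induction l with
  | nil => simp [pvDropStale] at h
  | cons a l' ihl =>
    by_cases hc : i - a > k
    · rw [pvDropStale, if_pos hc] at h; exact ihl h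
    · rw [pvDropStale, if_neg hc] at h; injection h with h1 _; omega

-- MAIN INVARIANT: the one-pass run from any reachable queue state equals the two-pointer merge
-- of the queues prepended to the police/thief indices of the remaining suffix.
theorem pvOnePass_eq (k : Int) (rest : List String) :
    ∀ (i : Int) (qp qt : List Int) (c : Int),
      (∀ x ∈ qp, x < i) → (∀ x ∈ qt, x < i) → (qp = [] ∨ qt = []) →
      pvOnePass k rest i qp qt c
        = pvTwoPtr k (qp ++ (pvBuildPT rest i).1) (qt ++ (pvBuildPT rest i).2) c := by
  induction rest with
  | nil =>
    intro i qp qt c _ _ hone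
    simp only [pvOnePass, pvBuildPT, List.append_nil]
    exact (pvTwoPtr_empty k qp qt c hone).symm
  | cons s rest ih =>
    intro i qp qt c hqp hqt hone
    by_cases hs : s = "P"
    · -- police element at index i
      rw [pvOnePass]
      simp only [if_pos hs]
      have hPT : pvBuildPT (s :: rest) i = (i :: (pvBuildPT rest (i+1)).1, (pvBuildPT rest (i+1)).2) := by
        simp [pvBuildPT, hs]
      rcases hone with hqpe | hqte
      · -- qp empty: match against the thief queue
        subst hqpe
        rw [hPT]
        simp only [List.nil_append]
        rw [pvTwoPtr_dropStale k i _ _ qt c hqt]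
        cases hdt : pvDropStale i k qt with
        | nil =>
          show pvOnePass k rest (i + 1) [i] [] c = _
          rw [ih (i+1) [i] [] c (by intro x hx; simp at hx; omega) (by simp) (Or.inr rfl)]
          simp
        | cons t tq' =>
          have ht : t < i := hqt t (pvDropStale_subset i k qt t (by rw [hdt]; exact List.mem_cons_self))
          have hkeep : i - t ≤ k := pvDropStale_front i k qt t tq' hdt
          have habs : |i - t| ≤ k := by rw [abs_of_pos (by omega)]; omega
          rw [List.cons_append, pvTwoPtr, if_pos habs]
          show pvOnePass k rest (i + 1) [] tq' (c + 1) = _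
          rw [ih (i+1) [] tq' (c+1) (by simp)
              (by intro x hx; have := hqt x (pvDropStale_subset i k qt x (by rw [hdt]; exact List.mem_cons_of_mem _ hx)); omega)
              (Or.inl rfl)]
          simp
      · -- qt empty: append i to the police queue
        subst hqte
        rw [hPT]
        simp only [pvDropStale]
        rw [ih (i+1) (qp ++ [i]) [] c
            (by intro x hx
                rcases List.mem_append.mp hx with h | h
                · exact lt_trans (hqp x h) (by omega)
                · simp at h; omega)
            (by simp) (Or.inr rfl)]
        simp
    · -- thief element at index i (symmetric)
      rw [pvOnePass]
      simp only [if_neg hs]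
      have hPT : pvBuildPT (s :: rest) i = ((pvBuildPT rest (i+1)).1, i :: (pvBuildPT rest (i+1)).2) := by
        simp [pvBuildPT, hs]
      rcases hone with hqpe | hqte
      · -- qp empty: append i to the thief queue
        subst hqpe
        rw [hPT]
        simp only [pvDropStale]
        rw [ih (i+1) [] (qt ++ [i]) c (by simp)
            (by intro x hx
                rcases List.mem_append.mp hx with h | h
                · exact lt_trans (hqt x h) (by omega)
                · simp at h; omega)
            (Or.inl rfl)]
        simp
      · -- qt empty: match against the police queue
        subst hqte
        rw [hPT]
        simp only [List.nil_append]
        rw [pvTwoPtr_dropStaleP k i _ _ qp c hqp]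
        cases hdp : pvDropStale i k qp with
        | nil =>
          show pvOnePass k rest (i + 1) [] [i] c = _
          rw [ih (i+1) [] [i] c (by simp) (by intro x hx; simp at hx; omega) (Or.inl rfl)]
          simp
        | cons p pq' =>
          have hp : p < i := hqp p (pvDropStale_subset i k qp p (by rw [hdp]; exact List.mem_cons_self))
          have hkeep : i - p ≤ k := pvDropStale_front i k qp p pq' hdp
          have habs : |p - i| ≤ k := by rw [abs_of_neg (by omega)]; omega
          rw [List.cons_append, pvTwoPtr, if_pos habs]
          show pvOnePass k rest (i + 1) pq' [] (c + 1) = _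
          rw [ih (i+1) pq' [] (c+1)
              (by intro x hx; have := hqp x (pvDropStale_subset i k qp x (by rw [hdp]; exact List.mem_cons_of_mem _ hx)); omega)
              (by simp) (Or.inr rfl)]
          simp

-- ===== VERDICT (by name: the statement is the Claim_ definition above) =====
theorem catchThieves_spec : Claim_equal_catchThieves := by
  intro arr k _
  unfold Spec_catchThieves catchThieves catchThieves_alt
  rw [pvOnePass_eq k arr 0 [] [] 0 (by simp) (by simp) (Or.inl rfl)]
  simp
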